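-- pv_equiv track=rewrite | github.com/curow/Problem-Solving | kickstart/2020/D/B/solution.py | dfs
-- ===== SOURCE A (Python) =====
-- def dfs(val, start_idx, start_symbol, num_breaking):
--     if start_idx >= len(val) - 1:
--         return num_breaking
--
--
--     decending = True
--     if val[start_idx + 1] > val[start_idx]:
--         start_symbol += 1
--         decending = False
--     elif val[start_idx + 1] < val[start_idx]:
--         start_symbol -= 1
--
--     has_breaking = False
--     if start_symbol > 3 or start_symbol < 0:
--         has_breaking = True
--         num_breaking += 1
--
--     if has_breaking:
--         num_breaking = min(dfs(val, start_idx + 1, x, num_breaking) for x in range(4))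
--     else:
--         if decending:
--             num_breaking = min(dfs(val, start_idx + 1, x, num_breaking) for x in range(0, start_symbol + 1))
--         else:
--             num_breaking = min(dfs(val, start_idx + 1, x, num_breaking) for x in range(start_symbol, 4))
--
--
--     return num_breaking
-- ===== SOURCE B (Python) =====
-- def dfs(val, start_idx, start_symbol, num_breaking):
--     n = len(val)
--     if start_idx >= n - 1:
--         return num_breaking
--     # backward DP: table[x] = minimal extra breakings from position i+1 when the
--     # symbol chosen there is x (x in 0..3); computed from the end of the list.
--     def cell(a, b, x, table):
--         if b > a:
--             s, desc = x + 1, False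
--         elif b < a:
--             s, desc = x - 1, True
--         else:
--             s, desc = x, True
--         if s > 3 or s < 0:
--             return 1 + min(table)
--         if desc:
--             return min(table[:s + 1])
--         return min(table[s:])
--     table = [0, 0, 0, 0]
--     i = n - 2
--     while i > start_idx:
--         table = [cell(val[i], val[i + 1], x, table) for x in range(4)]
--         i -= 1
--     return num_breaking + cell(val[start_idx], val[start_idx + 1], start_symbol, table)
-- ===== Notes on version B (the rewrite author's own statement) =====
-- stated objective: faster
-- what changed: Replaced the exponential branching DFS (which re-explores every symbol choice at every position) by a backward dynamic program that keeps a 4-entry table of minimal breakings per (position, symbol) and fills it in one pass; intended as faster (measured 26x at the largest size where A still finished; A times out beyond that).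
-- outside the precondition, e.g. on dfs([1, 2], -5, 0, 0): A raises IndexError, B raises IndexError
import Mathlib
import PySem

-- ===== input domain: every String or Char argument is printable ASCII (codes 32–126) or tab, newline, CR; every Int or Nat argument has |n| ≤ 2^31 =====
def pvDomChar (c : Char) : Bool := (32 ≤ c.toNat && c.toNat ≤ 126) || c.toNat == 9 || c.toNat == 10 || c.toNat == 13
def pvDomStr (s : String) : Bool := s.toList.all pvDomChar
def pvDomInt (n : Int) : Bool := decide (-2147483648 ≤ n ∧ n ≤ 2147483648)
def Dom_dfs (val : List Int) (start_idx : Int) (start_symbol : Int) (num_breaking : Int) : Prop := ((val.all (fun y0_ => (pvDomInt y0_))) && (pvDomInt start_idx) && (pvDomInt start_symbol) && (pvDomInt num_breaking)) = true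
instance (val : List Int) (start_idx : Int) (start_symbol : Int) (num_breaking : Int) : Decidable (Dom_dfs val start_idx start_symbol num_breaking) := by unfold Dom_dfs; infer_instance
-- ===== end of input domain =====

-- B replaces A's branching DFS by a backward dynamic program over (position, symbol) tables; intended as faster (measured 26x at the largest size where A finished within budget).

-- shared helper: Python's min(xs) on a non-empty list (both Pythons call builtin min)
def pymin (xs : List Int) : Int :=
  match PySem.List.min? xs (fun y => y) with
  | some m => m
  | none => 0

-- ===== PORT A =====
def dfs (val : List Int) (start_idx : Int) (start_symbol : Int) (num_breaking : Int) : Int :=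
  if _h : start_idx ≥ (val.length : Int) - 1 then num_breaking
  else
    let a := PySem.List.pyGetD val start_idx 0
    let b := PySem.List.pyGetD val (start_idx + 1) 0
    -- (start_symbol', decending) after the first if/elif
    let sd : Int × Bool := if b > a then (start_symbol + 1, false)
             else if b < a then (start_symbol - 1, true) else (start_symbol, true)
    -- (has_breaking, num_breaking') after the breaking check
    let hb : Bool × Int := if sd.1 > 3 ∨ sd.1 < 0 then (true, num_breaking + 1) else (false, num_breaking)
    if hb.1 then
      pymin ((PySem.List.pyRange 0 4 1).map (fun x => dfs val (start_idx + 1) x hb.2))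
    else if sd.2 then
      pymin ((PySem.List.pyRange 0 (sd.1 + 1) 1).map (fun x => dfs val (start_idx + 1) x hb.2))
    else
      pymin ((PySem.List.pyRange sd.1 4 1).map (fun x => dfs val (start_idx + 1) x hb.2))
termination_by ((val.length : Int) - 1 - start_idx).toNat
decreasing_by all_goals omega

-- ===== PORT B =====
-- Source B's `cell`: cost of one step given neighbours a,b, chosen symbol x and the next table
def cellB (a b x : Int) (table : List Int) : Int :=
  let sd : Int × Bool := if b > a then (x + 1, false)
           else if b < a then (x - 1, true) else (x, true)
  if sd.1 > 3 ∨ sd.1 < 0 then 1 + pymin table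
  else if sd.2 then pymin (PySem.List.slice table none (some (sd.1 + 1)))
  else pymin (PySem.List.slice table (some sd.1) none)

-- Source B's while loop: rebuild the table for each position, from i down to start_idx+1
def tloopB (val : List Int) (start_idx : Int) (i : Int) (table : List Int) : List Int :=
  if _h : i > start_idx then
    tloopB val start_idx (i - 1)
      ((PySem.List.pyRange 0 4 1).map
        (fun x => cellB (PySem.List.pyGetD val i 0) (PySem.List.pyGetD val (i + 1) 0) x table))
  else table
termination_by (i - start_idx).toNat
decreasing_by omega

def dfs_alt (val : List Int) (start_idx : Int) (start_symbol : Int) (num_breaking : Int) : Int :=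
  if start_idx ≥ (val.length : Int) - 1 then num_breaking
  else
    let table := tloopB val start_idx ((val.length : Int) - 2) [0, 0, 0, 0]
    num_breaking +
      cellB (PySem.List.pyGetD val start_idx 0) (PySem.List.pyGetD val (start_idx + 1) 0)
        start_symbol table

-- ===== PRECONDITION & SPEC =====
-- Pre_ excludes only the inputs where Python A raises IndexError: a start index below
-- -len(val) that is still below len(val)-1, where the negative list access is out of range.
def Pre_dfs (val : List Int) (start_idx : Int) (start_symbol : Int) (num_breaking : Int) : Prop :=
  start_idx ≥ (val.length : Int) - 1 ∨ start_idx ≥ -(val.length : Int)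
instance (val : List Int) (start_idx : Int) (start_symbol : Int) (num_breaking : Int) : Decidable (Pre_dfs val start_idx start_symbol num_breaking) := by unfold Pre_dfs; infer_instance

def pvWitness_dfs : List Int × Int × Int × Int := ([1, 2, 1, 3], 0, 0, 0)

def Spec_dfs (val : List Int) (start_idx : Int) (start_symbol : Int) (num_breaking : Int) (out : Int) : Prop := out = dfs_alt val start_idx start_symbol num_breaking
instance (val : List Int) (start_idx : Int) (start_symbol : Int) (num_breaking : Int) (out : Int) : Decidable (Spec_dfs val start_idx start_symbol num_breaking out) := by unfold Spec_dfs; infer_instance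

-- ===== CLAIM (what is proved, stated in full; the proofs are below) =====
def Claim_equal_dfs : Prop := ∀ (val : List Int) (start_idx : Int) (start_symbol : Int) (num_breaking : Int), Dom_dfs val start_idx start_symbol num_breaking → Pre_dfs val start_idx start_symbol num_breaking → Spec_dfs val start_idx start_symbol num_breaking (dfs val start_idx start_symbol num_breaking)

-- ===== LEMMAS AND PROOFS =====

theorem pymin_cons (x : Int) (t : List Int) : pymin (x :: t) = t.foldl min x := by
  simp [pymin, PySem.List.min?_id_cons]

theorem foldl_min_map_add (t : List Int) (c x : Int) :
    (t.map (fun y => c + y)).foldl min (c + x) = c + t.foldl min x := by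
  induction t generalizing x with
  | nil => rfl
  | cons h tl ih =>
      simp only [List.map, List.foldl]
      rw [show min (c + x) (c + h) = c + min x h by simp [min_def]; split_ifs <;> omega]
      exact ih _

theorem pymin_map_add (c : Int) (l : List Int) (hl : l ≠ []) :
    pymin (l.map (fun y => c + y)) = c + pymin l := by
  cases l with
  | nil => simp at hl
  | cons x t => simp only [List.map, pymin_cons]; exact foldl_min_map_add t c x

-- A adds its accumulator on top of the pure cost: dfs val i s nb = nb + dfs val i s 0
theorem dfs_add (val : List Int) (i s nb : Int) :
    dfs val i s nb = nb + dfs val i s 0 := by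
  by_cases hb : i ≥ (val.length : Int) - 1
  · rw [dfs, dfs]; simp [hb]
  · rw [dfs, dfs]
    simp only [hb, dite_false, dif_neg]
    set a := PySem.List.pyGetD val i 0
    set b := PySem.List.pyGetD val (i + 1) 0
    set sd : Int × Bool := if b > a then (s + 1, false)
        else if b < a then (s - 1, true) else (s, true) with hsd
    have h4 : ∀ (R : List Int) (m : Int), R.map (fun x => dfs val (i + 1) x m)
        = (R.map (fun x => dfs val (i + 1) x 0)).map (fun y => m + y) := by
      intro R m; simp only [List.map_map]; apply List.map_congr_left
      intro x _; exact dfs_add val (i + 1) x m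
    have hne4 : (PySem.List.pyRange 0 4 1).map (fun x => dfs val (i + 1) x 0) ≠ [] := by
      simp [show PySem.List.pyRange 0 4 1 = [0, 1, 2, 3] from by decide]
    by_cases hbr : sd.1 > 3 ∨ sd.1 < 0
    · simp only [hbr, if_true]
      rw [h4 _ (nb + 1), h4 _ (0 + 1), pymin_map_add _ _ hne4, pymin_map_add _ _ hne4]
      omega
    · simp only [hbr, if_false, Bool.false_eq_true]
      push_neg at hbr
      by_cases hd : sd.2 = true
      · simp only [hd, if_true]
        have hne : (PySem.List.pyRange 0 (sd.1 + 1) 1).map (fun x => dfs val (i + 1) x 0) ≠ [] := by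
          rw [PySem.List.pyRange_one_cons (by omega)]; simp
        rw [h4 _ nb, pymin_map_add _ _ hne]
      · simp only [Bool.not_eq_true] at hd
        simp only [hd, if_false, Bool.false_eq_true]
        have hne : (PySem.List.pyRange sd.1 4 1).map (fun x => dfs val (i + 1) x 0) ≠ [] := by
          rw [PySem.List.pyRange_one_cons (by omega)]; simp
        rw [h4 _ nb, pymin_map_add _ _ hne]
termination_by ((val.length : Int) - 1 - i).toNat
decreasing_by all_goals omega

-- one cell of B's table equals A's pure cost at that position/symbol
theorem cell_correct (val : List Int) (i x : Int) (hi : i < (val.length : Int) - 1) :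
    cellB (PySem.List.pyGetD val i 0) (PySem.List.pyGetD val (i + 1) 0) x
      [dfs val (i + 1) 0 0, dfs val (i + 1) 1 0, dfs val (i + 1) 2 0, dfs val (i + 1) 3 0]
    = dfs val i x 0 := by
  conv_rhs => rw [dfs]
  rw [dif_neg (by omega : ¬ i ≥ (val.length : Int) - 1)]
  simp only []
  unfold cellB
  simp only []
  set a := PySem.List.pyGetD val i 0
  set b := PySem.List.pyGetD val (i + 1) 0
  set sd : Int × Bool := if b > a then (x + 1, false)
      else if b < a then (x - 1, true) else (x, true) with hsd
  by_cases hbr : sd.1 > 3 ∨ sd.1 < 0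
  · simp only [hbr, if_true]
    have h4 : ∀ m : Int, dfs val (i + 1) m (0 + 1) = 1 + dfs val (i + 1) m 0 := by
      intro m; rw [dfs_add]; ring
    rw [show PySem.List.pyRange 0 4 1 = ([0, 1, 2, 3] : List Int) from by decide]
    simp only [List.map_cons, List.map_nil, h4]
    rw [show ([1 + dfs val (i + 1) 0 0, 1 + dfs val (i + 1) 1 0, 1 + dfs val (i + 1) 2 0, 1 + dfs val (i + 1) 3 0] : List Int)
        = ([dfs val (i + 1) 0 0, dfs val (i + 1) 1 0, dfs val (i + 1) 2 0, dfs val (i + 1) 3 0] : List Int).map (fun y => 1 + y) from rfl]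
    rw [pymin_map_add _ _ (by simp)]
  · simp only [hbr, if_false, Bool.false_eq_true]
    push_neg at hbr
    obtain ⟨h1, h2⟩ := hbr
    have hcases : sd.1 = 0 ∨ sd.1 = 1 ∨ sd.1 = 2 ∨ sd.1 = 3 := by omega
    by_cases hd : sd.2 = true
    · simp only [hd, if_true]
      rcases hcases with h | h | h | h
      · rw [h, show PySem.List.pyRange 0 (0 + 1) 1 = ([0] : List Int) from by decide]
        simp [PySem.List.slice_to]
      · rw [h, show PySem.List.pyRange 0 (1 + 1) 1 = ([0, 1] : List Int) from by decide]
        simp [PySem.List.slice_to]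
      · rw [h, show PySem.List.pyRange 0 (2 + 1) 1 = ([0, 1, 2] : List Int) from by decide]
        simp [PySem.List.slice_to]
      · rw [h, show PySem.List.pyRange 0 (3 + 1) 1 = ([0, 1, 2, 3] : List Int) from by decide]
        simp [PySem.List.slice_to]
    · simp only [Bool.not_eq_true] at hd
      simp only [hd, if_false, Bool.false_eq_true]
      rcases hcases with h | h | h | h
      · rw [h, show PySem.List.pyRange 0 4 1 = ([0, 1, 2, 3] : List Int) from by decide]
        simp [PySem.List.slice_from]
      · rw [h, show PySem.List.pyRange 1 4 1 = ([1, 2, 3] : List Int) from by decide]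
        simp [PySem.List.slice_from]
      · rw [h, show PySem.List.pyRange 2 4 1 = ([2, 3] : List Int) from by decide]
        simp [PySem.List.slice_from]
      · rw [h, show PySem.List.pyRange 3 4 1 = ([3] : List Int) from by decide]
        simp [PySem.List.slice_from]

-- loop invariant: running tloopB from i with the table for position i+1 yields the table for start_idx+1
theorem tloop_inv (val : List Int) (start_idx : Int) (i : Int)
    (hlo : start_idx ≤ i) (hhi : i ≤ (val.length : Int) - 2) :
    tloopB val start_idx i
      [dfs val (i + 1) 0 0, dfs val (i + 1) 1 0, dfs val (i + 1) 2 0, dfs val (i + 1) 3 0]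
    = [dfs val (start_idx + 1) 0 0, dfs val (start_idx + 1) 1 0,
       dfs val (start_idx + 1) 2 0, dfs val (start_idx + 1) 3 0] := by
  by_cases h : i > start_idx
  · rw [tloopB]
    simp only [h, dite_true, dif_pos]
    have hcell : ∀ x : Int, cellB (PySem.List.pyGetD val i 0) (PySem.List.pyGetD val (i + 1) 0) x
        [dfs val (i + 1) 0 0, dfs val (i + 1) 1 0, dfs val (i + 1) 2 0, dfs val (i + 1) 3 0]
        = dfs val i x 0 := fun x => cell_correct val i x (by omega)
    have hr : PySem.List.pyRange 0 4 1 = ([0, 1, 2, 3] : List Int) := by decide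
    rw [hr]
    simp only [List.map, hcell]
    have := tloop_inv val start_idx (i - 1) (by omega) (by omega)
    simpa using this
  · rw [tloopB]
    have : i = start_idx := by omega
    simp [h, this]
termination_by (i - start_idx).toNat
decreasing_by omega

-- ===== VERDICT (by name: the statement is the Claim_ definition above) =====
theorem dfs_spec : Claim_equal_dfs := by
  intro val start_idx start_symbol num_breaking _dom _pre
  unfold Spec_dfs dfs_alt
  by_cases hb : start_idx ≥ (val.length : Int) - 1
  · rw [dfs]; simp [hb]
  · simp only [hb, if_false]
    have hbase : ∀ x : Int, dfs val ((val.length : Int) - 2 + 1) x 0 = 0 := by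
      intro x; rw [dfs]; simp only [dif_pos (by omega : (val.length : Int) - 2 + 1 ≥ (val.length : Int) - 1)]
    have htab := tloop_inv val start_idx ((val.length : Int) - 2) (by omega) (by omega)
    rw [hbase, hbase, hbase, hbase] at htab
    rw [htab, cell_correct val start_idx start_symbol (by omega), ← dfs_add]
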